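-- pv_equiv track=rewrite | github.com/Algebra-FUN/DDM-Coursework | MSDM5002/Codespace/4-6. Solve_XYZ_Test_speed.py | func_check2
-- ===== SOURCE A (Python) =====
-- def func_check2(xx,yy,zz):
--     get_result=0
--     xx3=[x**3 for x in xx]
--     yy3=[y**3 for y in yy]
--     zz3=[z**3 for z in zz]
--     for x in xx3:
--         for y in yy3:
--             for z in zz3:
--                 if x+y+z == The_number:
--                     get_result=1
--                     return xx[xx3.index(x)],yy[yy3.index(y)],zz[zz3.index(z)],get_result
--     return xx[xx3.index(x)],yy[yy3.index(y)],zz[zz3.index(z)],get_result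
--
-- The_number=12
-- ===== SOURCE B (Python) =====
-- The_number = 12
--
-- def func_check2(xx, yy, zz):
--     # first-occurrence map: z**3 -> z
--     cube_of = {}
--     for z in zz:
--         c = z ** 3
--         if c not in cube_of:
--             cube_of[c] = z
--     for x in xx:
--         x3 = x ** 3
--         for y in yy:
--             t = The_number - x3 - y ** 3
--             if t in cube_of:
--                 return x, y, cube_of[t], 1
--     return xx[-1], yy[-1], zz[-1], 0
-- ===== Notes on version B (the rewrite author's own statement) =====
-- stated objective: faster
-- what changed: Replaces the triple nested scan (plus repeated list.index calls) by a hash map from z**3 to its first z, so each (x,y) pair does one O(1) complement lookup instead of an inner scan over zz.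
import Mathlib
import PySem

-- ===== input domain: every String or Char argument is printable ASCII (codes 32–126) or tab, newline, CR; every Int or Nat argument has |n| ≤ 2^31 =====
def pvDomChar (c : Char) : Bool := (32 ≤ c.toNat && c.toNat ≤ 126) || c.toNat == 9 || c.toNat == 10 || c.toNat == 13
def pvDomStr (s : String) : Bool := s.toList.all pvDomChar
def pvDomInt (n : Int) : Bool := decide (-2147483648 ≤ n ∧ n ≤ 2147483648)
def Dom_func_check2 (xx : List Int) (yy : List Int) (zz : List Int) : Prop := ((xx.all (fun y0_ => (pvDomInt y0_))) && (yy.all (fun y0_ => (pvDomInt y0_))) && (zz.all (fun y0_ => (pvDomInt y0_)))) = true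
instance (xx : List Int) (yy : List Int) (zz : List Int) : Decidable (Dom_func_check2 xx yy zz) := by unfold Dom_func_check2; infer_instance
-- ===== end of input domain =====

-- B replaces A's triple nested scan by a first-occurrence hash map z^3 ↦ z with one
-- complement lookup per (x,y) pair (objective: faster, asymptotic).

-- ===== PORT A =====
-- xs[xs3.index(v)]  (v always a member of xs3 when called, so the none branch is unreachable)
def pvIdx (xs : List Int) (xs3 : List Int) (v : Int) : Int :=
  match PySem.List.index? xs3 v with
  | some i => xs.getD i 0
  | none => 0

def fcA_loopZ (xx xx3 yy yy3 zz zz3 : List Int) (x y : Int) : List Int → Option (List Int)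
  | [] => none
  | z :: ws =>
    if x + y + z = 12 then
      some [pvIdx xx xx3 x, pvIdx yy yy3 y, pvIdx zz zz3 z, 1]
    else fcA_loopZ xx xx3 yy yy3 zz zz3 x y ws

def fcA_loopY (xx xx3 yy yy3 zz zz3 : List Int) (x : Int) : List Int → Option (List Int)
  | [] => none
  | y :: ws =>
    match fcA_loopZ xx xx3 yy yy3 zz zz3 x y zz3 with
    | some r => some r
    | none => fcA_loopY xx xx3 yy yy3 zz zz3 x ws

def fcA_loopX (xx xx3 yy yy3 zz zz3 : List Int) : List Int → Option (List Int)
  | [] => none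
  | x :: ws =>
    match fcA_loopY xx xx3 yy yy3 zz zz3 x yy3 with
    | some r => some r
    | none => fcA_loopX xx xx3 yy yy3 zz zz3 ws

def func_check2 (xx : List Int) (yy : List Int) (zz : List Int) : List Int :=
  let xx3 := xx.map (fun x => x ^ 3)
  let yy3 := yy.map (fun y => y ^ 3)
  let zz3 := zz.map (fun z => z ^ 3)
  match fcA_loopX xx xx3 yy yy3 zz zz3 xx3 with
  | some r => r
  | none => [pvIdx xx xx3 (xx3.getLastD 0), pvIdx yy yy3 (yy3.getLastD 0),
             pvIdx zz zz3 (zz3.getLastD 0), 0]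

-- ===== PORT B =====
def fcB_dict : List Int → PySem.Dict Int Int → PySem.Dict Int Int
  | [], d => d
  | z :: ws, d => fcB_dict ws (if d.contains (z ^ 3) then d else d.insert (z ^ 3) z)

def fcB_loopY (d : PySem.Dict Int Int) (x x3 : Int) : List Int → Option (List Int)
  | [] => none
  | y :: ws =>
    match d.get? (12 - x3 - y ^ 3) with
    | some z => some [x, y, z, 1]
    | none => fcB_loopY d x x3 ws

def fcB_loopX (d : PySem.Dict Int Int) (yy : List Int) : List Int → Option (List Int)
  | [] => none
  | x :: ws =>
    match fcB_loopY d x (x ^ 3) yy with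
    | some r => some r
    | none => fcB_loopX d yy ws

def func_check2_alt (xx : List Int) (yy : List Int) (zz : List Int) : List Int :=
  let d := fcB_dict zz PySem.Dict.empty
  match fcB_loopX d yy xx with
  | some r => r
  | none => [PySem.List.pyGetD xx (-1) 0, PySem.List.pyGetD yy (-1) 0,
             PySem.List.pyGetD zz (-1) 0, 0]

-- ===== PRECONDITION & SPEC =====
-- A raises (UnboundLocalError / NameError on its final return) exactly when one of the
-- three lists is empty; B raises there too (IndexError on xs[-1]). Pre_ excludes only those.
def Pre_func_check2 (xx : List Int) (yy : List Int) (zz : List Int) : Prop :=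
  xx ≠ [] ∧ yy ≠ [] ∧ zz ≠ []
instance (xx : List Int) (yy : List Int) (zz : List Int) : Decidable (Pre_func_check2 xx yy zz) := by
  unfold Pre_func_check2; infer_instance

def pvWitness_func_check2 : List Int × List Int × List Int := ([1, 2], [0, 3], [-1, 1])

def Spec_func_check2 (xx : List Int) (yy : List Int) (zz : List Int) (out : List Int) : Prop := out = func_check2_alt xx yy zz
instance (xx : List Int) (yy : List Int) (zz : List Int) (out : List Int) : Decidable (Spec_func_check2 xx yy zz out) := by unfold Spec_func_check2; infer_instance

-- ===== CLAIM (what is proved, stated in full; the proofs are below) =====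
def Claim_equal_func_check2 : Prop := ∀ (xx : List Int) (yy : List Int) (zz : List Int), Dom_func_check2 xx yy zz → Pre_func_check2 xx yy zz → Spec_func_check2 xx yy zz (func_check2 xx yy zz)

-- ===== LEMMAS AND PROOFS =====

theorem cube_inj {a b : Int} (h : a ^ 3 = b ^ 3) : a = b := by
  nlinarith [sq_nonneg a, sq_nonneg b, sq_nonneg (a - b), sq_nonneg (a + b)]

theorem pvIdx_cube {xs : List Int} {v : Int} (hv : v ∈ xs) :
    pvIdx xs (xs.map (fun x => x ^ 3)) (v ^ 3) = v := by
  induction xs with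
  | nil => cases hv
  | cons x ws ih =>
    by_cases hx : x = v
    · subst hx
      simp only [pvIdx, List.map_cons]
      rw [PySem.List.index?_cons_self]
      simp
    · have hvw : v ∈ ws := by
        rcases List.mem_cons.mp hv with h | h
        · exact absurd h.symm hx
        · exact h
      have hne : x ^ 3 ≠ v ^ 3 := fun h => hx (cube_inj h)
      have ihw := ih hvw
      simp only [pvIdx, List.map_cons] at ihw ⊢
      rw [PySem.List.index?_cons_of_ne (ws.map (fun x => x ^ 3)) hne]
      cases hidx : PySem.List.index? (ws.map (fun x => x ^ 3)) (v ^ 3) with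
      | none =>
        rw [hidx] at ihw
        simpa using ihw
      | some i =>
        rw [hidx] at ihw
        simpa using ihw

theorem fcB_dict_get (zs : List Int) (d : PySem.Dict Int Int) (t : Int) :
    (fcB_dict zs d).get? t = (d.get? t).or (zs.find? (fun z => z ^ 3 == t)) := by
  induction zs generalizing d with
  | nil => simp [fcB_dict]
  | cons z ws ih =>
    simp only [fcB_dict]
    rw [ih]
    by_cases ht : z ^ 3 = t
    · subst ht
      by_cases hc : d.contains (z ^ 3)
      · simp only [hc, if_true]
        have hs : (d.get? (z ^ 3)).isSome := by
          rwa [← PySem.Dict.contains_eq_isSome_get?]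
        cases hg : d.get? (z ^ 3) with
        | none => rw [hg] at hs; simp at hs
        | some w => simp
      · simp only [hc, Bool.false_eq_true, if_false]
        have hg : d.get? (z ^ 3) = none := by
          rw [PySem.Dict.get?_eq_none_iff_contains]
          simpa using hc
        simp [hg, PySem.Dict.get?_insert_self]
    · have hb : (z ^ 3 == t) = false := by simpa using ht
      by_cases hc : d.contains (z ^ 3)
      · simp [hc, hb]
      · simp only [hc, Bool.false_eq_true, if_false]
        rw [PySem.Dict.get?_insert_of_ne d z (Ne.symm ht)]
        simp [hb]

-- predicates agree
theorem pred_eq (x3 y3 : Int) :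
    (fun z : Int => z ^ 3 == 12 - x3 - y3) = (fun z : Int => x3 + y3 + z ^ 3 == 12) := by
  funext z
  rcases eq_or_ne (z ^ 3) (12 - x3 - y3) with h | h
  · simp [h]
  · have h2 : x3 + y3 + z ^ 3 ≠ 12 := by omega
    simp [h2]
    simpa using h

theorem loopZ_eq (xx yy zz : List Int) {x y : Int} (hx : x ∈ xx) (hy : y ∈ yy)
    (zs : List Int) (hzs : ∀ z ∈ zs, z ∈ zz) :
    fcA_loopZ xx (xx.map (fun a => a ^ 3)) yy (yy.map (fun a => a ^ 3)) zz (zz.map (fun a => a ^ 3))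
      (x ^ 3) (y ^ 3) (zs.map (fun a => a ^ 3))
      = (zs.find? (fun z => x ^ 3 + y ^ 3 + z ^ 3 == 12)).map (fun z => [x, y, z, 1]) := by
  induction zs with
  | nil => simp [fcA_loopZ]
  | cons z ws ih =>
    have hz : z ∈ zz := hzs z (List.mem_cons_self ..)
    simp only [List.map_cons, fcA_loopZ, List.find?_cons]
    by_cases hcond : x ^ 3 + y ^ 3 + z ^ 3 = 12
    · simp [hcond, pvIdx_cube hx, pvIdx_cube hy, pvIdx_cube hz]
    · have hb : (x ^ 3 + y ^ 3 + z ^ 3 == 12) = false := by simpa using hcond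
      simp only [hcond, if_false, hb]
      exact ih (fun w hw => hzs w (List.mem_cons_of_mem _ hw))

theorem loopY_eq (xx yy zz : List Int) {x : Int} (hx : x ∈ xx)
    (ys : List Int) (hys : ∀ y ∈ ys, y ∈ yy) :
    fcA_loopY xx (xx.map (fun a => a ^ 3)) yy (yy.map (fun a => a ^ 3)) zz (zz.map (fun a => a ^ 3))
      (x ^ 3) (ys.map (fun a => a ^ 3))
      = ys.findSome? (fun y => (zz.find? (fun z => x ^ 3 + y ^ 3 + z ^ 3 == 12)).map (fun z => [x, y, z, 1])) := by
  induction ys with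
  | nil => simp [fcA_loopY]
  | cons y ws ih =>
    have hy : y ∈ yy := hys y (List.mem_cons_self ..)
    simp only [List.map_cons, fcA_loopY, List.findSome?_cons]
    rw [loopZ_eq xx yy zz hx hy zz (fun _ h => h)]
    cases zz.find? (fun z => x ^ 3 + y ^ 3 + z ^ 3 == 12) with
    | none => simpa using ih (fun w hw => hys w (List.mem_cons_of_mem _ hw))
    | some z => rfl

theorem loopX_eq (xx yy zz : List Int) (xs : List Int) (hxs : ∀ x ∈ xs, x ∈ xx) :
    fcA_loopX xx (xx.map (fun a => a ^ 3)) yy (yy.map (fun a => a ^ 3)) zz (zz.map (fun a => a ^ 3))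
      (xs.map (fun a => a ^ 3))
      = xs.findSome? (fun x => yy.findSome? (fun y =>
          (zz.find? (fun z => x ^ 3 + y ^ 3 + z ^ 3 == 12)).map (fun z => [x, y, z, 1]))) := by
  induction xs with
  | nil => simp [fcA_loopX]
  | cons x ws ih =>
    have hx : x ∈ xx := hxs x (List.mem_cons_self ..)
    simp only [List.map_cons, fcA_loopX, List.findSome?_cons]
    rw [loopY_eq xx yy zz hx yy (fun _ h => h)]
    cases yy.findSome? (fun y => (zz.find? (fun z => x ^ 3 + y ^ 3 + z ^ 3 == 12)).map (fun z => [x, y, z, 1])) with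
    | none => simpa using ih (fun w hw => hxs w (List.mem_cons_of_mem _ hw))
    | some r => rfl

theorem fcB_loopY_eq (zz : List Int) (x : Int) (ys : List Int) :
    fcB_loopY (fcB_dict zz PySem.Dict.empty) x (x ^ 3) ys
      = ys.findSome? (fun y =>
          (zz.find? (fun z => x ^ 3 + y ^ 3 + z ^ 3 == 12)).map (fun z => [x, y, z, 1])) := by
  induction ys with
  | nil => simp [fcB_loopY]
  | cons y ws ih =>
    simp only [fcB_loopY, List.findSome?_cons]
    rw [fcB_dict_get, PySem.Dict.get?_empty, pred_eq (x ^ 3) (y ^ 3)]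
    simp only [Option.none_or]
    cases zz.find? (fun z => x ^ 3 + y ^ 3 + z ^ 3 == 12) with
    | none => simpa using ih
    | some z => rfl

theorem fcB_loopX_eq (zz yy : List Int) (xs : List Int) :
    fcB_loopX (fcB_dict zz PySem.Dict.empty) yy xs
      = xs.findSome? (fun x => yy.findSome? (fun y =>
          (zz.find? (fun z => x ^ 3 + y ^ 3 + z ^ 3 == 12)).map (fun z => [x, y, z, 1]))) := by
  induction xs with
  | nil => simp [fcB_loopX]
  | cons x ws ih =>
    simp only [fcB_loopX, List.findSome?_cons]
    rw [fcB_loopY_eq]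
    cases yy.findSome? (fun y => (zz.find? (fun z => x ^ 3 + y ^ 3 + z ^ 3 == 12)).map (fun z => [x, y, z, 1])) with
    | none => simpa using ih
    | some r => rfl

theorem fallback_eq {xs : List Int} (h : xs ≠ []) :
    pvIdx xs (xs.map (fun a => a ^ 3)) ((xs.map (fun a => a ^ 3)).getLastD 0)
      = PySem.List.pyGetD xs (-1) 0 := by
  have hlast : (xs.map (fun a => a ^ 3)).getLastD 0 = (xs.getLast h) ^ 3 := by
    rw [List.getLastD_eq_getLast?, List.getLast?_map, List.getLast?_eq_some_getLast h]
    rfl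
  rw [hlast, pvIdx_cube (List.getLast_mem h), PySem.List.pyGetD_neg_one xs 0 h]

-- ===== VERDICT (by name: the statement is the Claim_ definition above) =====
theorem func_check2_spec : Claim_equal_func_check2 := by
  intro xx yy zz _ hpre
  obtain ⟨hx, hy, hz⟩ := hpre
  unfold Spec_func_check2 func_check2 func_check2_alt
  simp only []
  rw [loopX_eq xx yy zz xx (fun _ h => h), ← fcB_loopX_eq zz yy xx]
  cases fcB_loopX (fcB_dict zz PySem.Dict.empty) yy xx with
  | some r => rfl
  | none => rw [fallback_eq hx, fallback_eq hy, fallback_eq hz]
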